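-- pv_equiv track=rewrite | github.com/CS2108-GProj/iSearch | integrate_search.py | get_integrate_score
-- ===== SOURCE A (Python) =====
-- CH_SCORE = 'CH_score'
--
-- VW_SCORE = 'VW_score'
--
-- VC_SCORE = 'VC_score'
--
-- def get_initialized_integrate_score(CH_result, VW_result, VC_result):
--     integrate_score_panel = {}
--
--     for ch_item, vw_item, vc_item in zip(CH_result, VW_result, VC_result):
--         ch_name = get_CH_name(ch_item)
--
--         vw_name = get_VW_name(vw_item)
--
--         vc_name = get_VC_name(vc_item)
--
--         try:
--             integrate_score_panel[ch_name]
--         except KeyError: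
--             integrate_score_panel[ch_name] = {}
--             integrate_score_panel[ch_name][CH_SCORE] = 30
--             integrate_score_panel[ch_name][VW_SCORE] = 1
--             integrate_score_panel[ch_name][VC_SCORE] = 0
--
--         try:
--             integrate_score_panel[vw_name]
--         except KeyError:
--             integrate_score_panel[vw_name] = {}
--             integrate_score_panel[vw_name][CH_SCORE] = 30
--             integrate_score_panel[vw_name][VW_SCORE] = 1
--             integrate_score_panel[vw_name][VC_SCORE] = 0
--
--         try:
--             integrate_score_panel[vc_name]
--         except KeyError:
--             integrate_score_panel[vc_name] = {}
--             integrate_score_panel[vc_name][CH_SCORE] = 30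
--             integrate_score_panel[vc_name][VW_SCORE] = 1
--             integrate_score_panel[vc_name][VC_SCORE] = 0
--
--     return integrate_score_panel
--
-- def get_integrate_score(CH_result, VW_result, VC_result):
--     integrate_score_panel = get_initialized_integrate_score(CH_result, VW_result, VC_result)
--
--     for ch_item, vw_item, vc_item in zip(CH_result, VW_result, VC_result):
--         ch_name = get_CH_name(ch_item)
--         ch_score = get_CH_score(ch_item)
--
--         vw_name = get_VW_name(vw_item)
--         vw_score = get_VW_score(vw_item)
--
--         vc_name = get_VC_name(vc_item)
--         vc_score = get_VC_score(vc_item)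
--
--         integrate_score_panel[ch_name][CH_SCORE] = ch_score
--         integrate_score_panel[vw_name][VW_SCORE] = vw_score
--         integrate_score_panel[vc_name][VC_SCORE] = vc_score
--
--     return integrate_score_panel
--
-- def get_CH_name(item):
--     return item[0]
--
-- def get_CH_score(item):
--     return item[1]
--
-- def get_VW_name(item):
--     return item[0]
--
-- def get_VW_score(item):
--     return item[1]
--
-- def get_VC_name(item):
--     return item[0]
--
-- def get_VC_score(item):
--     return item[1]
-- ===== SOURCE B (Python) =====
-- CH_SCORE = 'CH_score'
-- VW_SCORE = 'VW_score'
-- VC_SCORE = 'VC_score'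
--
-- def get_integrate_score(CH_result, VW_result, VC_result):
--     integrate_score_panel = {}
--     for (ch_name, ch_score), (vw_name, vw_score), (vc_name, vc_score) in zip(CH_result, VW_result, VC_result):
--         integrate_score_panel.setdefault(ch_name, {CH_SCORE: 30, VW_SCORE: 1, VC_SCORE: 0})[CH_SCORE] = ch_score
--         integrate_score_panel.setdefault(vw_name, {CH_SCORE: 30, VW_SCORE: 1, VC_SCORE: 0})[VW_SCORE] = vw_score
--         integrate_score_panel.setdefault(vc_name, {CH_SCORE: 30, VW_SCORE: 1, VC_SCORE: 0})[VC_SCORE] = vc_score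
--     return integrate_score_panel
-- ===== Notes on version B (the rewrite author's own statement) =====
-- stated objective: simpler
-- what changed: Replaces A's helper-based two-pass scheme (initialize every name with defaults over one zip pass, then overwrite scores in a second zip pass) with a single zip pass that uses setdefault to insert the default entry on first sight of a name and immediately assigns that role's score.
import Mathlib
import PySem

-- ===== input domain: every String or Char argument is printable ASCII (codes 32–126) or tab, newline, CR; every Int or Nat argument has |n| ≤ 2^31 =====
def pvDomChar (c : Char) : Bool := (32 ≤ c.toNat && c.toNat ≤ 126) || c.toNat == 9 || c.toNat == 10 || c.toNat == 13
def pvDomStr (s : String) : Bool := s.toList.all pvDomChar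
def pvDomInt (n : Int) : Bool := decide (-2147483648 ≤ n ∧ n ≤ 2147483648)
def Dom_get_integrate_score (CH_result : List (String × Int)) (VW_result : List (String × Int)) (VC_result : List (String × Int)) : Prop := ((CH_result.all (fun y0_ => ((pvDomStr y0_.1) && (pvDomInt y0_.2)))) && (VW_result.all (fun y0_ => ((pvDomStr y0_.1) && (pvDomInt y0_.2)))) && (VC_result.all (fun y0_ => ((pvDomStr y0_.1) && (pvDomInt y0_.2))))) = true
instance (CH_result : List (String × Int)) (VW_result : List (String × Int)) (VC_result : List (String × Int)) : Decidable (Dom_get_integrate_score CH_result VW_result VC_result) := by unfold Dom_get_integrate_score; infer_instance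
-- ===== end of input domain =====

-- B fuses A's two zip passes (initialize-all-then-overwrite-all) into one setdefault-based pass; objective: simpler.

-- ===== PORT A =====
-- try panel[name] / except KeyError: panel[name] = {}; panel[name][CH_SCORE] = 30; … — step for step
def pvInitName (d : PySem.Dict String (PySem.Dict String Int)) (name : String) : PySem.Dict String (PySem.Dict String Int) :=
  if d.contains name then d
  else
    (((d.insert name PySem.Dict.empty).modify name PySem.Dict.empty
        (fun e => e.insert "CH_score" 30)).modify name PySem.Dict.empty
        (fun e => e.insert "VW_score" 1)).modify name PySem.Dict.empty
        (fun e => e.insert "VC_score" 0)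

def get_initialized_integrate_score (CH_result : List (String × Int)) (VW_result : List (String × Int)) (VC_result : List (String × Int)) : PySem.Dict String (PySem.Dict String Int) :=
  (CH_result.zip (VW_result.zip VC_result)).foldl
    (fun d t => pvInitName (pvInitName (pvInitName d t.1.1) t.2.1.1) t.2.2.1)
    PySem.Dict.empty

-- panel[name][KEY] = score (name is always present after initialization)
def pvAssign (d : PySem.Dict String (PySem.Dict String Int)) (name key : String) (score : Int) : PySem.Dict String (PySem.Dict String Int) :=
  d.modify name PySem.Dict.empty (fun e => e.insert key score)

def get_integrate_score (CH_result : List (String × Int)) (VW_result : List (String × Int)) (VC_result : List (String × Int)) : List (String × List (String × Int)) :=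
  ((CH_result.zip (VW_result.zip VC_result)).foldl
      (fun d t =>
        pvAssign (pvAssign (pvAssign d t.1.1 "CH_score" t.1.2)
          t.2.1.1 "VW_score" t.2.1.2) t.2.2.1 "VC_score" t.2.2.2)
      (get_initialized_integrate_score CH_result VW_result VC_result)).items.map
    (fun p => (p.1, p.2.items))

-- ===== PORT B =====
-- panel.setdefault(name, {CH_SCORE: 30, VW_SCORE: 1, VC_SCORE: 0})[KEY] = score
def pvRole (d : PySem.Dict String (PySem.Dict String Int)) (name key : String) (score : Int) : PySem.Dict String (PySem.Dict String Int) :=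
  (d.setdefault name (PySem.Dict.ofList [("CH_score", 30), ("VW_score", 1), ("VC_score", 0)])).modify
    name PySem.Dict.empty (fun e => e.insert key score)

def get_integrate_score_alt (CH_result : List (String × Int)) (VW_result : List (String × Int)) (VC_result : List (String × Int)) : List (String × List (String × Int)) :=
  ((CH_result.zip (VW_result.zip VC_result)).foldl
      (fun d t =>
        pvRole (pvRole (pvRole d t.1.1 "CH_score" t.1.2)
          t.2.1.1 "VW_score" t.2.1.2) t.2.2.1 "VC_score" t.2.2.2)
      PySem.Dict.empty).items.map
    (fun p => (p.1, p.2.items))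

-- ===== PRECONDITION & SPEC =====
def Spec_get_integrate_score (CH_result : List (String × Int)) (VW_result : List (String × Int)) (VC_result : List (String × Int)) (out : List (String × List (String × Int))) : Prop := out = get_integrate_score_alt CH_result VW_result VC_result
instance (CH_result : List (String × Int)) (VW_result : List (String × Int)) (VC_result : List (String × Int)) (out : List (String × List (String × Int))) : Decidable (Spec_get_integrate_score CH_result VW_result VC_result out) := by unfold Spec_get_integrate_score; infer_instance

-- ===== CLAIM (what is proved, stated in full; the proofs are below) =====
def Claim_equal_get_integrate_score : Prop := ∀ (CH_result : List (String × Int)) (VW_result : List (String × Int)) (VC_result : List (String × Int)), Dom_get_integrate_score CH_result VW_result VC_result → Spec_get_integrate_score CH_result VW_result VC_result (get_integrate_score CH_result VW_result VC_result)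

-- ===== LEMMAS AND PROOFS =====

-- the default entry both programs initialize a fresh name with
def pvDefEntry : PySem.Dict String Int :=
  PySem.Dict.ofList [("CH_score", 30), ("VW_score", 1), ("VC_score", 0)]

-- proof-side normal forms of the two per-name operations
def pvEnsure (n : String) (d : PySem.Dict String (PySem.Dict String Int)) : PySem.Dict String (PySem.Dict String Int) :=
  if d.contains n then d else d.insert n pvDefEntry

def pvSet (d : PySem.Dict String (PySem.Dict String Int)) (r : String × String × Int) : PySem.Dict String (PySem.Dict String Int) :=
  d.insert r.1 ((d.getD r.1 PySem.Dict.empty).insert r.2.1 r.2.2)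

-- the flat list of (name, key, score) roles a zipped triple list induces
def pvRoles (l : List ((String × Int) × (String × Int) × (String × Int))) : List (String × String × Int) :=
  l.flatMap (fun t => [(t.1.1, "CH_score", t.1.2), (t.2.1.1, "VW_score", t.2.1.2), (t.2.2.1, "VC_score", t.2.2.2)])

lemma pvInitName_eq_ensure (d : PySem.Dict String (PySem.Dict String Int)) (n : String) :
    pvInitName d n = pvEnsure n d := by
  unfold pvInitName pvEnsure
  by_cases h : d.contains n = true
  · simp [h]
  · simp only [h, if_neg, Bool.not_eq_true]
    simp [PySem.Dict.modify, PySem.Dict.getD_insert_self, PySem.Dict.insert_insert_self, pvDefEntry]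
    rfl

lemma pvAssign_eq_set (d : PySem.Dict String (PySem.Dict String Int)) (n k : String) (s : Int) :
    pvAssign d n k s = pvSet d (n, k, s) := by
  simp [pvAssign, pvSet, PySem.Dict.modify]

lemma pvRole_eq (d : PySem.Dict String (PySem.Dict String Int)) (n k : String) (s : Int) :
    pvRole d n k s = pvSet (pvEnsure n d) (n, k, s) := by
  unfold pvRole pvEnsure
  by_cases h : d.contains n = true
  · simp [PySem.Dict.setdefault_of_contains _ _ h, h, pvSet, PySem.Dict.modify]
  · simp only [Bool.not_eq_true] at h
    rw [PySem.Dict.setdefault_of_not_contains _ _ h]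
    simp [pvSet, PySem.Dict.modify, pvDefEntry, h, PySem.Dict.getD_insert_self]

lemma contains_ensure (d : PySem.Dict String (PySem.Dict String Int)) (n m : String) :
    (pvEnsure n d).contains m = (m == n || d.contains m) := by
  unfold pvEnsure
  by_cases h : d.contains n = true
  · by_cases hm : m = n <;> simp [h, hm]
  · simp [h, PySem.Dict.contains_insert]

lemma contains_set (d : PySem.Dict String (PySem.Dict String Int)) (r : String × String × Int) (m : String) :
    (pvSet d r).contains m = (m == r.1 || d.contains m) := by
  simp [pvSet, PySem.Dict.contains_insert]

-- a later default-initialization commutes past an earlier score assignment to an already-present name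
lemma ensure_set_comm (d : PySem.Dict String (PySem.Dict String Int)) (n : String)
    (r : String × String × Int) (hr : d.contains r.1 = true) :
    pvEnsure n (pvSet d r) = pvSet (pvEnsure n d) r := by
  by_cases hn : d.contains n = true
  · have h1 : (pvSet d r).contains n = true := by simp [contains_set, hn]
    simp [pvEnsure, hn, h1]
  · simp only [Bool.not_eq_true] at hn
    have hne : n ≠ r.1 := fun h => by rw [h] at hn; rw [hn] at hr; exact Bool.false_ne_true hr
    have h1 : (pvSet d r).contains n = false := by
      simp [contains_set, hn, hne]
    have h2 : (pvEnsure n d).contains r.1 = true := by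
      simp [contains_ensure, hr]
    unfold pvEnsure
    rw [h1, if_neg (by simp), hn, if_neg (by simp)]
    -- both sides are two inserts at distinct keys; compare items
    apply PySem.Dict.ext
    have hgd : (d.insert n pvDefEntry).getD r.1 PySem.Dict.empty = d.getD r.1 PySem.Dict.empty :=
      PySem.Dict.getD_insert_of_ne _ _ _ (Ne.symm hne)
    have hcn : (pvSet d r).contains n = false := h1
    rw [show pvSet (d.insert n pvDefEntry) r =
        (d.insert n pvDefEntry).insert r.1 ((d.getD r.1 PySem.Dict.empty).insert r.2.1 r.2.2) by
      simp [pvSet, hgd]]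
    rw [PySem.Dict.items_insert_of_not_contains _ _ hcn]
    have hc' : (d.insert n pvDefEntry).contains r.1 = true := by
      simp [PySem.Dict.contains_insert, hr]
    rw [PySem.Dict.items_insert_of_contains _ _ hc']
    rw [PySem.Dict.items_insert_of_not_contains _ _ hn]
    rw [show pvSet d r = d.insert r.1 ((d.getD r.1 PySem.Dict.empty).insert r.2.1 r.2.2) from rfl]
    rw [PySem.Dict.items_insert_of_contains _ _ hr]
    simp [hne]

-- push one assignment through a whole initialization fold
lemma set_foldl_ensure (R : List (String × String × Int)) (d : PySem.Dict String (PySem.Dict String Int))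
    (r : String × String × Int) (hr : d.contains r.1 = true) :
    pvSet (R.foldl (fun d u => pvEnsure u.1 d) d) r = R.foldl (fun d u => pvEnsure u.1 d) (pvSet d r) := by
  induction R generalizing d with
  | nil => rfl
  | cons u R ih =>
    simp only [List.foldl_cons]
    rw [ih _ (by simp [contains_ensure, hr]), ensure_set_comm d u.1 r hr]

-- the fused pass equals init-all-then-assign-all, over the flat role list
lemma fused_eq_two_pass (R : List (String × String × Int)) (d : PySem.Dict String (PySem.Dict String Int)) :
    R.foldl pvSet (R.foldl (fun d u => pvEnsure u.1 d) d) =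
      R.foldl (fun d r => pvSet (pvEnsure r.1 d) r) d := by
  induction R generalizing d with
  | nil => rfl
  | cons r R ih =>
    simp only [List.foldl_cons]
    rw [set_foldl_ensure R (pvEnsure r.1 d) r (by simp [contains_ensure]), ih]

-- both ports' triple-step folds are folds over the flat role list
lemma initfold_eq (l : List ((String × Int) × (String × Int) × (String × Int)))
    (d : PySem.Dict String (PySem.Dict String Int)) :
    l.foldl (fun d t => pvInitName (pvInitName (pvInitName d t.1.1) t.2.1.1) t.2.2.1) d =
      (pvRoles l).foldl (fun d u => pvEnsure u.1 d) d := by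
  induction l generalizing d with
  | nil => rfl
  | cons t l ih => simp only [List.foldl_cons, pvRoles, List.flatMap_cons, List.foldl_append] at *
                   rw [ih]; simp [pvInitName_eq_ensure]

lemma owfold_eq (l : List ((String × Int) × (String × Int) × (String × Int)))
    (d : PySem.Dict String (PySem.Dict String Int)) :
    l.foldl (fun d t => pvAssign (pvAssign (pvAssign d t.1.1 "CH_score" t.1.2)
        t.2.1.1 "VW_score" t.2.1.2) t.2.2.1 "VC_score" t.2.2.2) d =
      (pvRoles l).foldl pvSet d := by
  induction l generalizing d with
  | nil => rfl
  | cons t l ih => simp only [List.foldl_cons, pvRoles, List.flatMap_cons, List.foldl_append] at *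
                   rw [ih]; simp [pvAssign_eq_set]

lemma fusedfold_eq (l : List ((String × Int) × (String × Int) × (String × Int)))
    (d : PySem.Dict String (PySem.Dict String Int)) :
    l.foldl (fun d t => pvRole (pvRole (pvRole d t.1.1 "CH_score" t.1.2)
        t.2.1.1 "VW_score" t.2.1.2) t.2.2.1 "VC_score" t.2.2.2) d =
      (pvRoles l).foldl (fun d r => pvSet (pvEnsure r.1 d) r) d := by
  induction l generalizing d with
  | nil => rfl
  | cons t l ih => simp only [List.foldl_cons, pvRoles, List.flatMap_cons, List.foldl_append] at *
                   rw [ih]; simp [pvRole_eq]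

-- ===== VERDICT (by name: the statement is the Claim_ definition above) =====
theorem get_integrate_score_spec : Claim_equal_get_integrate_score := by
  intro CH VW VC _
  unfold Spec_get_integrate_score get_integrate_score get_integrate_score_alt get_initialized_integrate_score
  rw [initfold_eq, owfold_eq, fusedfold_eq, fused_eq_two_pass]
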